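-- pv_equiv track=rewrite | github.com/ZZy979/LeetCode | 程序员面试金典/8.4幂集/subsets_3.py | int2subset
-- ===== SOURCE A (Python) =====
-- def int2subset(nums, x):
--     subset = []
--     i = 0
--     while x:
--         if x & 1:
--             subset.append(nums[i])
--         i += 1
--         x >>= 1
--     return subset
-- ===== SOURCE B (Python) =====
-- def int2subset(nums, x):
--     if not nums:
--         return []
--     if len(nums) == 1:
--         return [nums[0]] if x & 1 else []
--     mid = len(nums) // 2
--     return int2subset(nums[:mid], x % (2 ** mid)) + int2subset(nums[mid:], x >> mid)
-- ===== Notes on version B (the rewrite author's own statement) =====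
-- stated objective: alternative
-- what changed: Replaced A's linear while-loop that shifts the mask bit by bit with a divide-and-conquer recursion that splits nums in half and recurses on the low-bits mask (x mod 2^mid) for the left half and the shifted mask (x >> mid) for the right half.
import Mathlib
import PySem

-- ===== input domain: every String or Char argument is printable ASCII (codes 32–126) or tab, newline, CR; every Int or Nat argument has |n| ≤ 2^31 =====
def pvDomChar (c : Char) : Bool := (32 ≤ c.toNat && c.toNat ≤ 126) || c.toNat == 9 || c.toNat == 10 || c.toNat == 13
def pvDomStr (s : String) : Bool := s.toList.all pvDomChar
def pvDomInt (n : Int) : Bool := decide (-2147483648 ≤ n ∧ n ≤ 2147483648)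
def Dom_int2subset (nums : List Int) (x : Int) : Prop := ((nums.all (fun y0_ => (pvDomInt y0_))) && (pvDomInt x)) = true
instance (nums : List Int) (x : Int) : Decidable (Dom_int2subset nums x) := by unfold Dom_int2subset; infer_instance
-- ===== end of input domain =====

-- B replaces A's linear while-loop over a shifting mask by a divide-and-conquer
-- recursion on the two halves of nums (objective: alternative algorithm).

-- needed by port A's decreasing_by, hence above it
theorem pvShiftOne (x : Int) : x >>> (1:Nat) = x / 2 := by
  rw [Int.shiftRight_eq_div_pow]; norm_num

-- ===== PORT A =====
-- while x: if x & 1: subset.append(nums[i]); i += 1; x >>= 1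
-- The loop guard is ported as 0 < x: on x < 0 Python never terminates normally
-- (it raises IndexError), and Pre_ excludes x < 0.
def int2subsetGo (nums : List Int) (x : Int) (i : Nat) (subset : List Int) : List Int :=
  if _h : 0 < x then
    int2subsetGo nums (x >>> (1:Nat)) (i + 1)
      (if PySem.Int.band x 1 ≠ 0 then
        subset ++ [(PySem.List.pyGet? nums (i : Int)).getD 0]   -- in range under Pre_
      else subset)
  else subset
termination_by x.toNat
decreasing_by
  have h2 := pvShiftOne x; omega

def int2subset (nums : List Int) (x : Int) : List Int :=
  int2subsetGo nums x 0 []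

-- ===== PORT B =====
-- if not nums: []; if len == 1: [nums[0]] if x & 1 else [];
-- mid = len // 2; rec(nums[:mid], x % 2**mid) + rec(nums[mid:], x >> mid)
def int2subset_alt (nums : List Int) (x : Int) : List Int :=
  match nums with
  | [] => []
  | [n] => if PySem.Int.band x 1 ≠ 0 then [n] else []
  | a :: b :: t =>
    let mid : Nat := (a :: b :: t).length / 2
    int2subset_alt (PySem.List.slice (a :: b :: t) none (some (mid : Int)))
        (PySem.Int.mod x (2 ^ mid)) ++
    int2subset_alt (PySem.List.slice (a :: b :: t) (some (mid : Int)) none)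
        (x >>> mid)
termination_by nums.length
decreasing_by
  · simp only [PySem.List.slice_to_natCast, List.length_take, List.length_cons]; omega
  · simp only [PySem.List.slice_from_natCast, List.length_drop, List.length_cons]; omega

-- ===== PRECONDITION & SPEC =====
-- Pre_ : exactly the masks on which A terminates normally; outside it A raises
-- IndexError (negative masks sign-extend, large masks index past the end of nums).
def Pre_int2subset (nums : List Int) (x : Int) : Prop :=
  0 ≤ x ∧ x < 2 ^ nums.length
instance (nums : List Int) (x : Int) : Decidable (Pre_int2subset nums x) := by
  unfold Pre_int2subset; infer_instance
def pvWitness_int2subset : List Int × Int := ([1, 2, 3], 5)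

def Spec_int2subset (nums : List Int) (x : Int) (out : List Int) : Prop := out = int2subset_alt nums x
instance (nums : List Int) (x : Int) (out : List Int) : Decidable (Spec_int2subset nums x out) := by unfold Spec_int2subset; infer_instance

-- ===== CLAIM (what is proved, stated in full; the proofs are below) =====
def Claim_equal_int2subset : Prop := ∀ (nums : List Int) (x : Int), Dom_int2subset nums x → Pre_int2subset nums x → Spec_int2subset nums x (int2subset nums x)

-- ===== LEMMAS AND PROOFS =====

-- common shape both ports are reduced to: walk the list, testing the low bit and halving
def pickBits : List Int → Int → List Int
  | [], _ => []
  | n :: t, x => (if PySem.Int.band x 1 ≠ 0 then [n] else []) ++ pickBits t (x >>> (1:Nat))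

theorem pickBits_zero_aux (l : List Int) : pickBits l 0 = [] := by
  induction l with
  | nil => rfl
  | cons n t ih =>
    have hb : PySem.Int.band (0:Int) 1 = 0 := by decide
    have hz : (0:Int) >>> (1:Nat) = 0 := by decide
    simp [pickBits, hb, hz, ih]

theorem pvA_spec (l : List Int) : ∀ (nums : List Int) (i : Nat) (x : Int) (acc : List Int),
    nums.drop i = l → 0 ≤ x → x < 2 ^ l.length →
    int2subsetGo nums x i acc = acc ++ pickBits l x := by
  induction l with
  | nil =>
    intro nums i x acc _ h0 hlt
    have hx : x = 0 := by simp at hlt; omega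
    rw [int2subsetGo]
    simp [hx, pickBits]
  | cons n t ih =>
    intro nums i x acc hdrop h0 hlt
    by_cases hx : 0 < x
    · have hget : nums[i]? = some n := by
        have : (nums.drop i)[0]? = some n := by rw [hdrop]; rfl
        simpa using this
      have hdrop' : nums.drop (i + 1) = t := by
        have : nums.drop (i + 1) = (nums.drop i).drop 1 := by
          rw [List.drop_drop]
        rw [this, hdrop]; rfl
      have hs1 := pvShiftOne x
      have h0' : 0 ≤ x >>> (1:Nat) := by omega
      have hlt' : x >>> (1:Nat) < 2 ^ t.length := by
        have hp : (2:Int) ^ (n :: t).length = 2 ^ t.length * 2 := by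
          simp [pow_succ]
        rw [hs1]
        have h2 : (0:Int) < 2 := by norm_num
        rw [Int.ediv_lt_iff_lt_mul h2]
        omega
      rw [int2subsetGo]
      simp only [hx, dif_pos]
      rw [ih nums (i + 1) (x >>> (1:Nat)) _ hdrop' h0' hlt']
      have hg : PySem.List.pyGet? nums (i : Int) = some n := by
        rw [PySem.List.pyGet?_natCast, hget]
      by_cases hb : PySem.Int.band x 1 ≠ 0
      · simp [pickBits, hb, hg]
      · simp [pickBits, hb]
    · have hx0 : x = 0 := by omega
      rw [int2subsetGo]
      have hb : PySem.Int.band (0:Int) 1 = 0 := by decide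
      simp [hx0, pickBits, hb, pickBits_zero_aux t]

-- (x % 2^(k+1)) / 2 = (x / 2) % 2^k on nonnegative x, by transfer to Nat
theorem pvModDiv (x : Int) (hx : 0 ≤ x) (k : Nat) :
    (x % ((2:Int) ^ (k + 1))) / 2 = (x / 2) % ((2:Int) ^ k) := by
  obtain ⟨m, rfl⟩ := Int.eq_ofNat_of_zero_le hx
  have h : (m % 2 ^ (k + 1)) / 2 = (m / 2) % 2 ^ k := by
    have := Nat.mod_mul_right_div_self m 2 (2 ^ k)
    rw [pow_succ, Nat.mul_comm]
    exact this
  exact_mod_cast h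

-- low bit is unchanged by taking x mod an even power of two
theorem pvModBand (x : Int) (k : Nat) :
    PySem.Int.band (x % (2:Int) ^ (k + 1)) 1 = PySem.Int.band x 1 := by
  have h2 : (0:Int) < 2 := by norm_num
  rw [PySem.Int.band_one, PySem.Int.band_one,
      PySem.Int.mod_eq_emod_of_pos h2, PySem.Int.mod_eq_emod_of_pos h2]
  exact Int.emod_emod_of_dvd x (dvd_pow_self 2 (Nat.succ_ne_zero k))

-- the divide step: pickBits splits along any cut of the list
theorem pickBits_append (l1 : List Int) : ∀ (l2 : List Int) (x : Int), 0 ≤ x →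
    pickBits (l1 ++ l2) x
      = pickBits l1 (x % (2:Int) ^ l1.length) ++ pickBits l2 (x / (2:Int) ^ l1.length) := by
  induction l1 with
  | nil => intro l2 x _; simp [pickBits]
  | cons a t ih =>
    intro l2 x hx
    have hs1 := pvShiftOne x
    have hx' : 0 ≤ x / 2 := Int.ediv_nonneg hx (by norm_num)
    have htl := ih l2 (x / 2) hx'
    have hmd := pvModDiv x hx t.length
    have hmodnn : 0 ≤ x % (2:Int) ^ (t.length + 1) :=
      Int.emod_nonneg x (by positivity)
    have hdd : x / 2 / (2:Int) ^ t.length = x / (2:Int) ^ (t.length + 1) := by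
      rw [Int.ediv_ediv_of_nonneg (by norm_num), pow_succ, mul_comm ((2:Int) ^ t.length) 2]
    have hsm : (x % (2:Int) ^ (t.length + 1)) >>> (1:Nat) = (x / 2) % (2:Int) ^ t.length := by
      rw [pvShiftOne, hmd]
    simp only [List.cons_append, pickBits, List.length_cons, hs1, htl, hdd,
      pvModBand x t.length, hsm, List.append_assoc]

-- B computes pickBits on every nonnegative mask
theorem pvB_spec (nums : List Int) (x : Int) :
    0 ≤ x → int2subset_alt nums x = pickBits nums x := by
  fun_induction int2subset_alt nums x with
  | case1 x => intro _; simp [pickBits]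
  | case2 x n h => intro _; simp [pickBits, h]
  | case3 x n h => intro _; simp [pickBits, h]
  | case4 x a b t mid ih1 ih2 =>
    intro hx
    have hmidle : mid ≤ (a :: b :: t).length := Nat.div_le_self _ _
    have hxm : 0 ≤ PySem.Int.mod x (2 ^ mid) :=
      PySem.Int.mod_nonneg x (by positivity)
    have hxs : 0 ≤ x >>> mid := by
      rw [Int.shiftRight_eq_div_pow]
      exact Int.ediv_nonneg hx (by positivity)
    rw [ih1 hxm, ih2 hxs, PySem.List.slice_to_natCast, PySem.List.slice_from_natCast,
        PySem.Int.mod_eq_emod_of_pos (by positivity), Int.shiftRight_eq_div_pow]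
    have happ := pickBits_append ((a :: b :: t).take mid) ((a :: b :: t).drop mid) x hx
    rw [List.take_append_drop, List.length_take, Nat.min_eq_left hmidle] at happ
    exact happ.symm

-- ===== VERDICT (by name: the statement is the Claim_ definition above) =====
theorem int2subset_spec : Claim_equal_int2subset := by
  intro nums x _ hpre
  unfold Spec_int2subset int2subset
  rw [pvA_spec nums nums 0 x [] (by simp) hpre.1 hpre.2, pvB_spec nums x hpre.1]
  simp
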